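-- pv_equiv track=rewrite | github.com/GlangherStudent/auto-job-applier-linkedin-bot | modules/smart_answers.py | match_select_option
-- ===== SOURCE A (Python) =====
-- def match_select_option(label: str, options: list, answer: str) -> str:
--     '''
--     Matches answer to available select options using fuzzy logic.
--
--     Args:
--         label: Question label
--         options: List of available options
--         answer: Desired answer
--
--     Returns:
--         Best matching option or first option
--     '''
--     if not options:
--         return answer
--
--     answer_lower = answer.lower()
--
--     # Exact match
--     for option in options:
--         if option.lower() == answer_lower:
--             return option
--
--     # Partial match
--     for option in options:
--         if answer_lower in option.lower() or option.lower() in answer_lower: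
--             return option
--
--     # Common answer variations (including variants that indicate you have NOT worked at the company)
--     if answer.lower() in ['yes', 'no', 'decline']:
--         variations = {
--             'yes': ['yes', 'agree', 'i do', 'i have', 'affirmative'],
--             'no': ['no', 'disagree', "i don't", 'i do not', 'negative', 'never', 'have not worked', 'not worked', 'never worked', 'do not have', "haven't"],
--             'decline': ['decline', 'prefer not', 'not wish', "don't wish"]
--         }
--
--         for option in options:
--             option_lower = option.lower()
--             for variant in variations.get(answer.lower(), []):
--                 if variant in option_lower:
--                     return option
--
--     # No good match, return first non-default option
--     if len(options) > 1 and options[0].lower() in ['select an option', 'select', 'choose']: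
--         return options[1]
--
--     return options[0] if options else answer
-- ===== SOURCE B (Python) =====
-- VARIATIONS = {
--     'yes': ['yes', 'agree', 'i do', 'i have', 'affirmative'],
--     'no': ['no', 'disagree', "i don't", 'i do not', 'negative', 'never', 'have not worked', 'not worked', 'never worked', 'do not have', "haven't"],
--     'decline': ['decline', 'prefer not', 'not wish', "don't wish"],
-- }
--
--
-- def match_select_option(label: str, options: list, answer: str) -> str:
--     if not options:
--         return answer
--     al = answer.lower()
--     variants = VARIATIONS.get(al, [])
--     best_p, best = 3, None
--     for o in options:
--         ol = o.lower()
--         if ol == al: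
--             p = 0
--         elif al in ol or ol in al:
--             p = 1
--         elif any(v in ol for v in variants):
--             p = 2
--         else:
--             p = 3
--         if p < best_p:
--             best_p, best = p, o
--         if best_p == 0:
--             break
--     if best is not None:
--         return best
--     if len(options) > 1 and options[0].lower() in ('select an option', 'select', 'choose'):
--         return options[1]
--     return options[0]
-- ===== Notes on version B (the rewrite author's own statement) =====
-- stated objective: alternative
-- what changed: Replaces A's three sequential scans over the options (exact, substring, variation tiers) by a single pass that scores each option with a priority 0/1/2/3, keeps the earliest option with the strictly smallest priority, and stops early once an exact (priority-0) match is seen; the default/placeholder fallback is unchanged.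
import Mathlib
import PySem

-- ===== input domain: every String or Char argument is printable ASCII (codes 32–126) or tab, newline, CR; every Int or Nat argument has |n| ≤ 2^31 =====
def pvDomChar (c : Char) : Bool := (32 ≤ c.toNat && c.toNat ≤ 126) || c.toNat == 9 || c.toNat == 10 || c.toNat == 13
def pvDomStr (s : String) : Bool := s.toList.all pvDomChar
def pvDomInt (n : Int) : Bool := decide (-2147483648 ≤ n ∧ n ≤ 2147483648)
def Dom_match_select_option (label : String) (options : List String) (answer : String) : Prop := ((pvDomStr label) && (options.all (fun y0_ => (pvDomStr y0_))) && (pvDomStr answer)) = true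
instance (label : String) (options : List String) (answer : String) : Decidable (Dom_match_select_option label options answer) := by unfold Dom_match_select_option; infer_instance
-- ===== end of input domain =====

-- B replaces A's three sequential scans over the options by a single scored pass
-- (priority 0/1/2/3 per option, earliest strict minimum wins); same return value.

-- ===== PORT A =====
def match_select_option (label : String) (options : List String) (answer : String) : String :=
  if options = [] then answer
  else
    let answerLower := PySem.Str.lower answer
    -- Exact match
    match options.find? (fun option => PySem.Str.lower option == answerLower) with
    | some option => option
    | none =>
      -- Partial match
      match options.find? (fun option =>
          PySem.Str.isIn answerLower (PySem.Str.lower option) ||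
          PySem.Str.isIn (PySem.Str.lower option) answerLower) with
      | some option => option
      | none =>
        -- Common answer variations
        let tier3 :=
          if (["yes", "no", "decline"] : List String).contains (PySem.Str.lower answer) then
            let variations : PySem.Dict String (List String) :=
              PySem.Dict.ofList
                [("yes", ["yes", "agree", "i do", "i have", "affirmative"]),
                 ("no", ["no", "disagree", "i don't", "i do not", "negative", "never", "have not worked", "not worked", "never worked", "do not have", "haven't"]),
                 ("decline", ["decline", "prefer not", "not wish", "don't wish"])]
            options.find? (fun option =>
              (variations.getD (PySem.Str.lower answer) []).any
                (fun variant => PySem.Str.isIn variant (PySem.Str.lower option)))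
          else none
        match tier3 with
        | some option => option
        | none =>
          -- No good match, return first non-default option
          if 1 < options.length &&
             (["select an option", "select", "choose"] : List String).contains
               (PySem.Str.lower ((PySem.List.pyGet? options 0).getD "")) then
            (PySem.List.pyGet? options 1).getD ""
          else
            if options ≠ [] then (PySem.List.pyGet? options 0).getD "" else answer

-- ===== PORT B =====
-- the per-option priority B computes (0 exact, 1 substring, 2 variation, 3 none)
def msoPrio (al : String) (variants : List String) (o : String) : Nat :=
  let ol := PySem.Str.lower o
  if ol == al then 0
  else if PySem.Str.isIn al ol || PySem.Str.isIn ol al then 1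
  else if variants.any (fun v => PySem.Str.isIn v ol) then 2
  else 3

-- B's early-exit scan: score each option, keep the earliest strict minimum, stop at 0
def msoScan (al : String) (variants : List String) : List String → Nat × Option String → Nat × Option String
  | [], best => best
  | o :: rest, best =>
    let p := msoPrio al variants o
    let best' := if p < best.1 then (p, some o) else best
    if best'.1 = 0 then best' else msoScan al variants rest best'

-- B's module-level VARIATIONS constant
def msoVariations : PySem.Dict String (List String) :=
  PySem.Dict.ofList
    [("yes", ["yes", "agree", "i do", "i have", "affirmative"]),
     ("no", ["no", "disagree", "i don't", "i do not", "negative", "never", "have not worked", "not worked", "never worked", "do not have", "haven't"]),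
     ("decline", ["decline", "prefer not", "not wish", "don't wish"])]


def match_select_option_alt (label : String) (options : List String) (answer : String) : String :=
  if options = [] then answer
  else
    let al := PySem.Str.lower answer
    let variants := msoVariations.getD al []
    let best := msoScan al variants options (3, none)
    match best.2 with
    | some o => o
    | none =>
      if 1 < options.length &&
         (["select an option", "select", "choose"] : List String).contains
           (PySem.Str.lower ((PySem.List.pyGet? options 0).getD "")) then
        (PySem.List.pyGet? options 1).getD ""
      else (PySem.List.pyGet? options 0).getD ""

-- ===== PRECONDITION & SPEC =====
def Spec_match_select_option (label : String) (options : List String) (answer : String) (out : String) : Prop := out = match_select_option_alt label options answer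
instance (label : String) (options : List String) (answer : String) (out : String) : Decidable (Spec_match_select_option label options answer out) := by unfold Spec_match_select_option; infer_instance

-- ===== CLAIM (what is proved, stated in full; the proofs are below) =====
def Claim_equal_match_select_option : Prop := ∀ (label : String) (options : List String) (answer : String), Dom_match_select_option label options answer → Spec_match_select_option label options answer (match_select_option label options answer)

-- ===== LEMMAS AND PROOFS =====

-- find? respects pointwise-equal predicates on the list's members
theorem mso_find?_congr {l : List String} {p q : String → Bool}
    (h : ∀ x ∈ l, p x = q x) : l.find? p = l.find? q := by
  induction l with
  | nil => rfl
  | cons a t ih =>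
    simp only [List.find?_cons, h a (List.mem_cons_self)]
    cases q a
    · exact ih (fun x hx => h x (List.mem_cons_of_mem _ hx))
    · rfl

-- B's scan does not move when every remaining priority is ≥ the current best
theorem mso_scan_stay (al : String) (variants : List String) (l : List String) (b : Nat) (cur : Option String)
    (h : ∀ o ∈ l, b ≤ msoPrio al variants o) :
    msoScan al variants l (b, cur) = (b, cur) := by
  induction l generalizing b cur with
  | nil => rfl
  | cons a t ih =>
    have hp : ¬ msoPrio al variants a < b := by
      have := h a List.mem_cons_self; omega
    simp only [msoScan, if_neg hp]
    split_ifs with h0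
    · rfl
    · exact ih b cur (fun o ho => h o (List.mem_cons_of_mem _ ho))

-- B's scan lands on the first element of priority k when k is the minimum in sight
theorem mso_scan_min (al : String) (variants : List String) (l : List String) (b : Nat) (cur : Option String)
    (k : Nat) (x : String) (hkb : k < b) (hlo : ∀ o ∈ l, k ≤ msoPrio al variants o)
    (hfind : l.find? (fun o => msoPrio al variants o == k) = some x) :
    (msoScan al variants l (b, cur)).2 = some x := by
  induction l generalizing b cur with
  | nil => simp at hfind
  | cons a t ih =>
    simp only [List.find?_cons] at hfind
    by_cases ha : msoPrio al variants a = k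
    · rw [show ((msoPrio al variants a == k) = true) from by simp [ha]] at hfind
      simp only [msoScan, ha, if_pos hkb]
      split_ifs with h0
      · simpa using hfind
      · rw [mso_scan_stay al variants t k (some a) (fun o ho => hlo o (List.mem_cons_of_mem _ ho))]
        simpa using hfind
    · rw [show ((msoPrio al variants a == k) = false) from by simp [ha]] at hfind
      have hak : k < msoPrio al variants a := lt_of_le_of_ne (hlo a List.mem_cons_self) (Ne.symm ha)
      by_cases hab : msoPrio al variants a < b
      · have hne : ¬((msoPrio al variants a, some a) : Nat × Option String).1 = 0 := by
          simp; omega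
        simp only [msoScan, if_pos hab, if_neg hne]
        exact ih (msoPrio al variants a) (some a) hak (fun o ho => hlo o (List.mem_cons_of_mem _ ho)) hfind
      · have hne : ¬(((b, cur) : Nat × Option String).1 = 0) := by
          simp; omega
        simp only [msoScan, if_neg hab, if_neg hne]
        exact ih b cur hkb (fun o ho => hlo o (List.mem_cons_of_mem _ ho)) hfind

-- pointwise facts about B's priority function
theorem msoPrio_eq_zero (al : String) (variants : List String) (o : String) :
    (msoPrio al variants o == 0) = (PySem.Str.lower o == al) := by
  simp only [msoPrio]; split_ifs with h1 h2 h3 <;> simp [h1]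

theorem msoPrio_pos (al : String) (variants : List String) (o : String)
    (h0 : (PySem.Str.lower o == al) = false) : 1 ≤ msoPrio al variants o := by
  simp only [msoPrio]; split_ifs with h1 h2 h3 <;> simp_all

theorem msoPrio_eq_one (al : String) (variants : List String) (o : String)
    (h0 : (PySem.Str.lower o == al) = false) :
    (msoPrio al variants o == 1)
      = (PySem.Str.isIn al (PySem.Str.lower o) || PySem.Str.isIn (PySem.Str.lower o) al) := by
  simp only [msoPrio]; split_ifs with h1 h2 h3 <;> simp_all

theorem msoPrio_ge_two (al : String) (variants : List String) (o : String)
    (h0 : (PySem.Str.lower o == al) = false)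
    (h1 : (PySem.Str.isIn al (PySem.Str.lower o) || PySem.Str.isIn (PySem.Str.lower o) al) = false) :
    2 ≤ msoPrio al variants o := by
  simp only [msoPrio]; split_ifs with g1 g2 g3 <;> simp_all

theorem msoPrio_eq_two (al : String) (variants : List String) (o : String)
    (h0 : (PySem.Str.lower o == al) = false)
    (h1 : (PySem.Str.isIn al (PySem.Str.lower o) || PySem.Str.isIn (PySem.Str.lower o) al) = false) :
    (msoPrio al variants o == 2)
      = (variants.any (fun v => PySem.Str.isIn v (PySem.Str.lower o))) := by
  simp only [msoPrio]; split_ifs with g1 g2 g3 <;> simp_all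

theorem msoPrio_ge_three (al : String) (variants : List String) (o : String)
    (h0 : (PySem.Str.lower o == al) = false)
    (h1 : (PySem.Str.isIn al (PySem.Str.lower o) || PySem.Str.isIn (PySem.Str.lower o) al) = false)
    (h2 : (variants.any (fun v => PySem.Str.isIn v (PySem.Str.lower o))) = false) :
    3 ≤ msoPrio al variants o := by
  simp only [msoPrio]
  split_ifs with g1 g2 g3
  · simp_all
  · simp_all
  · rw [h2] at g3; cases g3
  · omega

-- when answer.lower() is not one of the three keys, B's variants list is empty
theorem msoVariations_getD_empty (al : String)
    (h1 : al ≠ "yes") (h2 : al ≠ "no") (h3 : al ≠ "decline") :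
    msoVariations.getD al [] = [] := by
  have hmk : msoVariations = PySem.Dict.mk
      [("yes", ["yes", "agree", "i do", "i have", "affirmative"]),
       ("no", ["no", "disagree", "i don't", "i do not", "negative", "never", "have not worked", "not worked", "never worked", "do not have", "haven't"]),
       ("decline", ["decline", "prefer not", "not wish", "don't wish"])] := by decide
  rw [hmk]
  simp [PySem.Dict.getD, PySem.Dict.get?,
        Ne.symm h1, Ne.symm h2, Ne.symm h3]

-- ===== VERDICT (by name: the statement is the Claim_ definition above) =====
theorem match_select_option_spec : Claim_equal_match_select_option := by
  intro label options answer _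
  unfold Spec_match_select_option match_select_option match_select_option_alt
  by_cases hnil : options = []
  · simp [hnil]
  · simp only [if_neg hnil]
    set al := PySem.Str.lower answer with hal
    set variants := msoVariations.getD al [] with hvar
    -- A's guarded variation block is the plain tier-2 scan (empty variants when the guard fails)
    have htier :
        (if (["yes", "no", "decline"] : List String).contains al = true then
            options.find? (fun option =>
              ((PySem.Dict.ofList
                [("yes", ["yes", "agree", "i do", "i have", "affirmative"]),
                 ("no", ["no", "disagree", "i don't", "i do not", "negative", "never", "have not worked", "not worked", "never worked", "do not have", "haven't"]),
                 ("decline", ["decline", "prefer not", "not wish", "don't wish"])] : PySem.Dict String (List String)).getD al []).any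
                (fun variant => PySem.Str.isIn variant (PySem.Str.lower option)))
          else none)
        = options.find? (fun o =>
            variants.any (fun v => PySem.Str.isIn v (PySem.Str.lower o))) := by
      by_cases hkey : (["yes", "no", "decline"] : List String).contains al = true
      · rw [if_pos hkey]; rfl
      · rw [if_neg hkey]
        simp only [List.contains_eq_mem, List.mem_cons, List.not_mem_nil, or_false,
          decide_eq_true_eq, not_or] at hkey
        have hv : variants = [] := by
          rw [hvar]; exact msoVariations_getD_empty al hkey.1 hkey.2.1 hkey.2.2
        exact (List.find?_eq_none.mpr (fun x _ => by simp [hv])).symm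
    rw [htier]
    cases hF0 : options.find? (fun option => PySem.Str.lower option == al) with
    | some x =>
      have hfind : options.find? (fun o => msoPrio al variants o == 0) = some x := by
        rw [mso_find?_congr (fun o _ => msoPrio_eq_zero al variants o)]; exact hF0
      have hB := mso_scan_min al variants options 3 none 0 x (by omega)
        (fun o _ => Nat.zero_le _) hfind
      simp only [hB]
    | none =>
      have h0 : ∀ o ∈ options, (PySem.Str.lower o == al) = false := by
        intro o ho
        simpa using List.find?_eq_none.mp hF0 o ho
      cases hF1 : options.find? (fun option =>
          PySem.Str.isIn al (PySem.Str.lower option) ||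
          PySem.Str.isIn (PySem.Str.lower option) al) with
      | some x =>
        have hfind : options.find? (fun o => msoPrio al variants o == 1) = some x := by
          rw [mso_find?_congr (fun o ho => msoPrio_eq_one al variants o (h0 o ho))]; exact hF1
        have hB := mso_scan_min al variants options 3 none 1 x (by omega)
          (fun o ho => msoPrio_pos al variants o (h0 o ho)) hfind
        simp only [hB]
      | none =>
        have h1 : ∀ o ∈ options,
            (PySem.Str.isIn al (PySem.Str.lower o) || PySem.Str.isIn (PySem.Str.lower o) al) = false := by
          intro o ho
          simpa using List.find?_eq_none.mp hF1 o ho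
        cases hF2 : options.find? (fun o =>
            variants.any (fun v => PySem.Str.isIn v (PySem.Str.lower o))) with
        | some x =>
          have hfind : options.find? (fun o => msoPrio al variants o == 2) = some x := by
            rw [mso_find?_congr (fun o ho => msoPrio_eq_two al variants o (h0 o ho) (h1 o ho))]
            exact hF2
          have hB := mso_scan_min al variants options 3 none 2 x (by omega)
            (fun o ho => msoPrio_ge_two al variants o (h0 o ho) (h1 o ho)) hfind
          simp only [hB]
        | none =>
          have h2 : ∀ o ∈ options,
              (variants.any (fun v => PySem.Str.isIn v (PySem.Str.lower o))) = false := by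
            intro o ho
            simpa using List.find?_eq_none.mp hF2 o ho
          have hB := mso_scan_stay al variants options 3 none
            (fun o ho => msoPrio_ge_three al variants o (h0 o ho) (h1 o ho) (h2 o ho))
          simp only [hB]
          simp [hnil]
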